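-- pv_equiv track=rewrite | github.com/mat-tador/MelodyMatrix | backend/music_generator.py | apply_genre_character
-- ===== SOURCE A (Python) =====
-- from typing import Dict, List, Optional
--
-- def apply_genre_character(
--     chain: Dict[str, List[str]], genre: str, instrument_type: str
-- ) -> Dict[str, List[str]]:
--     adjusted = {k: v[:] for k, v in chain.items()}
--
--     if genre == "Ambient":
--         for key in adjusted:
--             adjusted[key].append(key)
--
--     elif genre == "House":
--         if instrument_type == "drums":
--             for key in adjusted:
--                 adjusted[key].append("Closed")
--         if instrument_type == "bass" and "Do" in adjusted:
--             adjusted["Do"] = ["Do", "Do", "Sol", "Pausa"] + adjusted["Do"]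
--         if instrument_type == "chords" and "i" in adjusted:
--             adjusted["i"] = ["VI", "VI"] + adjusted["i"]
--
--     elif genre == "Hip Hop":
--         if instrument_type == "bass" and "Pausa" in adjusted:
--             adjusted["Pausa"] = ["Do", "Mib", "Sol", "Pausa"]
--         if instrument_type == "melody":
--             for key in adjusted:
--                 adjusted[key].append("PausaMelody")
--         if instrument_type == "chords" and "i" in adjusted:
--             adjusted["i"] = ["VII", "VI"] + adjusted["i"]
--
--     elif genre == "Techno-Jazz":
--         if instrument_type == "melody" and "Sol" in adjusted:
--             adjusted["Sol"] = ["Sib", "Do_Alto", "Fa", "Mib"] + adjusted["Sol"]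
--         if instrument_type == "chords" and "i" in adjusted:
--             adjusted["i"] = ["iv", "v", "VI"] + adjusted["i"]
--
--     return adjusted
-- ===== SOURCE B (Python) =====
-- RULES = {
--     "Ambient": [(None, ("append_key",))],
--     "House": [
--         ("drums", ("append_all", "Closed")),
--         ("bass", ("prepend", "Do", ["Do", "Do", "Sol", "Pausa"])),
--         ("chords", ("prepend", "i", ["VI", "VI"])),
--     ],
--     "Hip Hop": [
--         ("bass", ("set_if_present", "Pausa", ["Do", "Mib", "Sol", "Pausa"])),
--         ("melody", ("append_all", "PausaMelody")),
--         ("chords", ("prepend", "i", ["VII", "VI"])),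
--     ],
--     "Techno-Jazz": [
--         ("melody", ("prepend", "Sol", ["Sib", "Do_Alto", "Fa", "Mib"])),
--         ("chords", ("prepend", "i", ["iv", "v", "VI"])),
--     ],
-- }
--
--
-- def apply_genre_character(chain, genre, instrument_type):
--     adjusted = {k: v[:] for k, v in chain.items()}
--     for instr, op in RULES.get(genre, []):
--         if instr is not None and instr != instrument_type:
--             continue
--         tag = op[0]
--         if tag == "append_all":
--             for k in adjusted:
--                 adjusted[k].append(op[1])
--         elif tag == "append_key":
--             for k in adjusted:
--                 adjusted[k].append(k)
--         elif tag == "prepend":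
--             _, key, prefix = op
--             if key in adjusted:
--                 adjusted[key] = prefix + adjusted[key]
--         elif tag == "set_if_present":
--             _, key, value = op
--             if key in adjusted:
--                 adjusted[key] = list(value)
--     return adjusted
-- ===== Notes on version B (the rewrite author's own statement) =====
-- stated objective: idiomatic
-- what changed: Replaced the nested genre/instrument if-elif tower by a declarative per-genre rule table (dict of tagged operations with instrument guards) interpreted by one uniform loop.
import Mathlib
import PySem

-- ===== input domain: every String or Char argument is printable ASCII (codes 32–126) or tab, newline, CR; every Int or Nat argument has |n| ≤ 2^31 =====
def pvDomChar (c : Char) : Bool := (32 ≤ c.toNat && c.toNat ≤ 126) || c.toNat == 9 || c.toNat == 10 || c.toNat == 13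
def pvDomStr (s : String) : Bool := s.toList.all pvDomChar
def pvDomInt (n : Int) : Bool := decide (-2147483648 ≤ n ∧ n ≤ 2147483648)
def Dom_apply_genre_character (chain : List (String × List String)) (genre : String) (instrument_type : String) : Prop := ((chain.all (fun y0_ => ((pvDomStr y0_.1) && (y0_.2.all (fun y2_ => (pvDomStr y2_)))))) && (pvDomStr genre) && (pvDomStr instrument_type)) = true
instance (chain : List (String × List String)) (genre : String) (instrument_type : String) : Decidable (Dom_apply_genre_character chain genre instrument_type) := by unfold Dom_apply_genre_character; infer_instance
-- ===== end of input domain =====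

-- B replaces A's nested if/elif tower by a per-genre rule table plus one uniform
-- interpreter pass (objective: idiomatic decomposition; same cost).

-- ===== PORT A =====
def apply_genre_character (chain : List (String × List String)) (genre : String) (instrument_type : String) : List (String × List String) :=
  -- adjusted = {k: v[:] for k, v in chain.items()}
  let adjusted : PySem.Dict String (List String) :=
    chain.foldl (fun d kv => d.insert kv.1 kv.2) PySem.Dict.empty
  let adjusted :=
    if genre == "Ambient" then
      adjusted.keys.foldl (fun d key => d.modify key [] (fun v => v ++ [key])) adjusted
    else if genre == "House" then
      let adjusted :=
        if instrument_type == "drums" then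
          adjusted.keys.foldl (fun d key => d.modify key [] (fun v => v ++ ["Closed"])) adjusted
        else adjusted
      let adjusted :=
        if instrument_type == "bass" && adjusted.contains "Do" then
          adjusted.insert "Do" (["Do", "Do", "Sol", "Pausa"] ++ adjusted.getD "Do" [])
        else adjusted
      let adjusted :=
        if instrument_type == "chords" && adjusted.contains "i" then
          adjusted.insert "i" (["VI", "VI"] ++ adjusted.getD "i" [])
        else adjusted
      adjusted
    else if genre == "Hip Hop" then
      let adjusted :=
        if instrument_type == "bass" && adjusted.contains "Pausa" then
          adjusted.insert "Pausa" ["Do", "Mib", "Sol", "Pausa"]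
        else adjusted
      let adjusted :=
        if instrument_type == "melody" then
          adjusted.keys.foldl (fun d key => d.modify key [] (fun v => v ++ ["PausaMelody"])) adjusted
        else adjusted
      let adjusted :=
        if instrument_type == "chords" && adjusted.contains "i" then
          adjusted.insert "i" (["VII", "VI"] ++ adjusted.getD "i" [])
        else adjusted
      adjusted
    else if genre == "Techno-Jazz" then
      let adjusted :=
        if instrument_type == "melody" && adjusted.contains "Sol" then
          adjusted.insert "Sol" (["Sib", "Do_Alto", "Fa", "Mib"] ++ adjusted.getD "Sol" [])
        else adjusted
      let adjusted :=
        if instrument_type == "chords" && adjusted.contains "i" then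
          adjusted.insert "i" (["iv", "v", "VI"] ++ adjusted.getD "i" [])
        else adjusted
      adjusted
    else adjusted
  adjusted.items

-- ===== PORT B =====
-- one tagged operation of the rule table (op tuples of Source B)
inductive GOp where
  | appendAll : String → GOp
  | appendKey : GOp
  | prepend : String → List String → GOp
  | setIfPresent : String → List String → GOp
deriving DecidableEq, Repr

-- RULES of Source B: genre ↦ list of (optional instrument guard, operation)
def genreRules : PySem.Dict String (List (Option String × GOp)) :=
  PySem.Dict.ofList
    [ ("Ambient", [(none, GOp.appendKey)])
    , ("House",
        [ (some "drums", GOp.appendAll "Closed")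
        , (some "bass", GOp.prepend "Do" ["Do", "Do", "Sol", "Pausa"])
        , (some "chords", GOp.prepend "i" ["VI", "VI"]) ])
    , ("Hip Hop",
        [ (some "bass", GOp.setIfPresent "Pausa" ["Do", "Mib", "Sol", "Pausa"])
        , (some "melody", GOp.appendAll "PausaMelody")
        , (some "chords", GOp.prepend "i" ["VII", "VI"]) ])
    , ("Techno-Jazz",
        [ (some "melody", GOp.prepend "Sol" ["Sib", "Do_Alto", "Fa", "Mib"])
        , (some "chords", GOp.prepend "i" ["iv", "v", "VI"]) ]) ]

-- the tag dispatch in the interpreter loop's body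
def applyGOp (d : PySem.Dict String (List String)) (op : GOp) : PySem.Dict String (List String) :=
  match op with
  | GOp.appendAll x => d.keys.foldl (fun d k => d.modify k [] (fun v => v ++ [x])) d
  | GOp.appendKey => d.keys.foldl (fun d k => d.modify k [] (fun v => v ++ [k])) d
  | GOp.prepend key pre => if d.contains key then d.insert key (pre ++ d.getD key []) else d
  | GOp.setIfPresent key value => if d.contains key then d.insert key value else d

def apply_genre_character_alt (chain : List (String × List String)) (genre : String) (instrument_type : String) : List (String × List String) :=
  let adjusted : PySem.Dict String (List String) :=
    chain.foldl (fun d kv => d.insert kv.1 kv.2) PySem.Dict.empty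
  ((genreRules.getD genre []).foldl
      (fun d r =>
        if r.1.all (fun instr => instr == instrument_type) then applyGOp d r.2 else d)
      adjusted).items

-- ===== PRECONDITION & SPEC =====
def Spec_apply_genre_character (chain : List (String × List String)) (genre : String) (instrument_type : String) (out : List (String × List String)) : Prop := out = apply_genre_character_alt chain genre instrument_type
instance (chain : List (String × List String)) (genre : String) (instrument_type : String) (out : List (String × List String)) : Decidable (Spec_apply_genre_character chain genre instrument_type out) := by unfold Spec_apply_genre_character; infer_instance

-- ===== CLAIM (what is proved, stated in full; the proofs are below) =====
def Claim_equal_apply_genre_character : Prop := ∀ (chain : List (String × List String)) (genre : String) (instrument_type : String), Dom_apply_genre_character chain genre instrument_type → Spec_apply_genre_character chain genre instrument_type (apply_genre_character chain genre instrument_type)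

-- ===== LEMMAS AND PROOFS =====
theorem apply_genre_character_eq_alt (chain : List (String × List String)) (genre : String) (instrument_type : String) :
    apply_genre_character chain genre instrument_type = apply_genre_character_alt chain genre instrument_type := by
  by_cases hg1 : genre = "Ambient"
  · subst hg1; rfl
  · by_cases hg2 : genre = "House"
    · subst hg2
      by_cases hi : instrument_type = "drums"
      · subst hi; rfl
      · by_cases hi2 : instrument_type = "bass"
        · subst hi2; rfl
        · by_cases hi3 : instrument_type = "chords"
          · subst hi3; rfl
          · have e : genreRules.getD "House" []
                = [ (some "drums", GOp.appendAll "Closed")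
                  , (some "bass", GOp.prepend "Do" ["Do", "Do", "Sol", "Pausa"])
                  , (some "chords", GOp.prepend "i" ["VI", "VI"]) ] := rfl
            simp [apply_genre_character, apply_genre_character_alt, e, applyGOp,
              hi, hi2, hi3, Ne.symm hi, Ne.symm hi2, Ne.symm hi3]
    · by_cases hg3 : genre = "Hip Hop"
      · subst hg3
        by_cases hi : instrument_type = "bass"
        · subst hi; rfl
        · by_cases hi2 : instrument_type = "melody"
          · subst hi2; rfl
          · by_cases hi3 : instrument_type = "chords"
            · subst hi3; rfl
            · have e : genreRules.getD "Hip Hop" []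
                  = [ (some "bass", GOp.setIfPresent "Pausa" ["Do", "Mib", "Sol", "Pausa"])
                    , (some "melody", GOp.appendAll "PausaMelody")
                    , (some "chords", GOp.prepend "i" ["VII", "VI"]) ] := rfl
              simp [apply_genre_character, apply_genre_character_alt, e, applyGOp,
                hi, hi2, hi3, Ne.symm hi, Ne.symm hi2, Ne.symm hi3]
      · by_cases hg4 : genre = "Techno-Jazz"
        · subst hg4
          by_cases hi : instrument_type = "melody"
          · subst hi; rfl
          · by_cases hi2 : instrument_type = "chords"
            · subst hi2; rfl
            · have e : genreRules.getD "Techno-Jazz" []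
                  = [ (some "melody", GOp.prepend "Sol" ["Sib", "Do_Alto", "Fa", "Mib"])
                    , (some "chords", GOp.prepend "i" ["iv", "v", "VI"]) ] := rfl
              simp [apply_genre_character, apply_genre_character_alt, e, applyGOp,
                hi, hi2, Ne.symm hi, Ne.symm hi2]
        · have hmk : genreRules = PySem.Dict.mk
              [ ("Ambient", [(none, GOp.appendKey)])
              , ("House",
                  [ (some "drums", GOp.appendAll "Closed")
                  , (some "bass", GOp.prepend "Do" ["Do", "Do", "Sol", "Pausa"])
                  , (some "chords", GOp.prepend "i" ["VI", "VI"]) ])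
              , ("Hip Hop",
                  [ (some "bass", GOp.setIfPresent "Pausa" ["Do", "Mib", "Sol", "Pausa"])
                  , (some "melody", GOp.appendAll "PausaMelody")
                  , (some "chords", GOp.prepend "i" ["VII", "VI"]) ])
              , ("Techno-Jazz",
                  [ (some "melody", GOp.prepend "Sol" ["Sib", "Do_Alto", "Fa", "Mib"])
                  , (some "chords", GOp.prepend "i" ["iv", "v", "VI"]) ]) ] := rfl
          have e : genreRules.getD genre [] = [] := by
            simp [hmk, PySem.Dict.getD, PySem.Dict.get?,
              Ne.symm hg1, Ne.symm hg2, Ne.symm hg3, Ne.symm hg4]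
          simp [apply_genre_character, apply_genre_character_alt, e, hg1, hg2, hg3, hg4]

-- ===== VERDICT (by name: the statement is the Claim_ definition above) =====
theorem apply_genre_character_spec : Claim_equal_apply_genre_character := by
  intro chain genre instrument_type _
  exact apply_genre_character_eq_alt chain genre instrument_type
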